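-- pv_equiv track=rewrite | github.com/Jayhawk314/KOMPOSOS-III-ALPHA | hott/homotopy.py | _find_shared_spine
-- ===== SOURCE A (Python) =====
-- from typing import Any, List, Dict, Set, Optional, Tuple
--
-- def _find_shared_spine(paths: List[List[str]]) -> List[str]:
--     """
--     Find the shared spine - nodes that appear in ALL paths.
--
--     The spine represents the "essential" intermediaries that
--     every evolutionary pathway must pass through.
--     """
--     if not paths:
--         return []
--
--     # Start with first path
--     spine_set = set(paths[0])
--
--     # Intersect with all other paths
--     for path in paths[1:]:
--         spine_set &= set(path)
--
--     # Maintain order from first path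
--     spine = [node for node in paths[0] if node in spine_set]
--
--     return spine
-- ===== SOURCE B (Python) =====
-- def _find_shared_spine(paths):
--     """Counting re-implementation: one pass builds a node -> number-of-paths
--     frequency dict; the spine is the nodes of paths[0] hit by all paths."""
--     if not paths:
--         return []
--     counts = {}
--     for path in paths:
--         for node in set(path):
--             counts[node] = counts.get(node, 0) + 1
--     n = len(paths)
--     return [node for node in paths[0] if counts.get(node, 0) == n]
-- ===== Notes on version B (the rewrite author's own statement) =====
-- stated objective: alternative
-- what changed: Replaces repeated pairwise set intersections with a single counting pass (node -> number of distinct paths containing it) followed by a threshold filter over paths[0].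
import Mathlib
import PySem

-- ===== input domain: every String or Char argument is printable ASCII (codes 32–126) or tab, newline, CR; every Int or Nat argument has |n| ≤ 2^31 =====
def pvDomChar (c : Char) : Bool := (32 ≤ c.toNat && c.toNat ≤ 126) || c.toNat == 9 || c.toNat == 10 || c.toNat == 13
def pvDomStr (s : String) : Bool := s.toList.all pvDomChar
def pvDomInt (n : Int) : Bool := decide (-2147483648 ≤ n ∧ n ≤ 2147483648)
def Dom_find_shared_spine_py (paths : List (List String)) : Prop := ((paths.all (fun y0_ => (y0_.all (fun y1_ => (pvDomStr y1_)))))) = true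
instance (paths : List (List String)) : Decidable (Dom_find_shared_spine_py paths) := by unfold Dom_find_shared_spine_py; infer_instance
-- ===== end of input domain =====

-- B replaces A's repeated pairwise set intersections with one counting pass
-- (node -> number of distinct paths containing it) plus a threshold filter; same cost, alternative structure.

-- ===== PORT A =====
def find_shared_spine_py (paths : List (List String)) : List String :=
  match paths with
  | [] => []
  | p0 :: rest =>
    -- spine_set = set(paths[0]); for path in paths[1:]: spine_set &= set(path)
    let spineSet : PySem.Set String :=
      rest.foldl (fun s path => PySem.Set.inter s (PySem.Set.ofList path)) (PySem.Set.ofList p0)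
    -- [node for node in paths[0] if node in spine_set]
    p0.filter (fun node => PySem.Set.contains spineSet node)

-- ===== PORT B =====
def find_shared_spine_py_alt (paths : List (List String)) : List String :=
  match paths with
  | [] => []
  | p0 :: _ =>
    -- counts[node] = counts.get(node, 0) + 1, once per path in which node occurs
    let counts : PySem.Dict String Int :=
      paths.foldl
        (fun d path => (PySem.Set.ofList path).foldl (fun d node => d.modify node 0 (· + 1)) d)
        PySem.Dict.empty
    let n : Int := paths.length
    p0.filter (fun node => counts.getD node 0 == n)

-- ===== PRECONDITION & SPEC =====
def Spec_find_shared_spine_py (paths : List (List String)) (out : List String) : Prop := out = find_shared_spine_py_alt paths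
instance (paths : List (List String)) (out : List String) : Decidable (Spec_find_shared_spine_py paths out) := by unfold Spec_find_shared_spine_py; infer_instance

-- ===== CLAIM (what is proved, stated in full; the proofs are below) =====
def Claim_equal_find_shared_spine_py : Prop := ∀ (paths : List (List String)), Dom_find_shared_spine_py paths → Spec_find_shared_spine_py paths (find_shared_spine_py paths)

-- ===== LEMMAS AND PROOFS =====

-- A's intersection fold: membership means membership in the start set and in every later path.
theorem mem_foldl_inter (rest : List (List String)) (s : PySem.Set String) (x : String) :
    x ∈ rest.foldl (fun s path => PySem.Set.inter s (PySem.Set.ofList path)) s ↔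
      x ∈ s ∧ ∀ p ∈ rest, x ∈ p := by
  induction rest generalizing s with
  | nil => simp
  | cons p rest ih =>
    simp [List.foldl_cons, ih, PySem.Set.mem_inter, PySem.Set.mem_ofList]
    tauto

-- B's counting fold: the stored count of x is the number of paths containing x.
theorem getD_count_fold (paths : List (List String)) (d : PySem.Dict String Int) (x : String) :
    (paths.foldl
        (fun d path => (PySem.Set.ofList path).foldl (fun d node => d.modify node 0 (· + 1)) d)
        d).getD x 0
      = d.getD x 0 + (paths.countP (fun p => decide (x ∈ p)) : Int) := by
  induction paths generalizing d with
  | nil => simp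
  | cons p rest ih =>
    rw [List.foldl_cons, ih, PySem.Dict.getD_foldl_modify_add_one, List.countP_cons]
    by_cases hx : x ∈ p
    · rw [List.count_eq_one_of_mem (PySem.Set.nodup_ofList p) ((PySem.Set.mem_ofList p x).mpr hx)]
      simp [hx]; ring
    · rw [List.count_eq_zero_of_not_mem (fun h => hx ((PySem.Set.mem_ofList p x).mp h))]
      simp [hx]

-- ===== VERDICT (by name: the statement is the Claim_ definition above) =====
theorem find_shared_spine_py_spec : Claim_equal_find_shared_spine_py := by
  intro paths _
  unfold Spec_find_shared_spine_py find_shared_spine_py find_shared_spine_py_alt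
  match paths with
  | [] => rfl
  | p0 :: rest =>
    simp only
    apply List.filter_congr
    intro node hnode
    have hA : PySem.Set.contains
        (rest.foldl (fun s path => PySem.Set.inter s (PySem.Set.ofList path)) (PySem.Set.ofList p0)) node
        = true ↔ ∀ p ∈ rest, node ∈ p := by
      rw [PySem.Set.contains_iff, mem_foldl_inter]
      simp [PySem.Set.mem_ofList, hnode]
    have hB : (((p0 :: rest).foldl
        (fun d path => (PySem.Set.ofList path).foldl (fun d node => d.modify node 0 (· + 1)) d)
        PySem.Dict.empty).getD node 0 == ((p0 :: rest).length : Int)) = true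
        ↔ ∀ p ∈ rest, node ∈ p := by
      rw [getD_count_fold]
      simp only [PySem.Dict.getD, PySem.Dict.get?, beq_iff_eq]
      constructor
      · intro h
        have hlen : (p0 :: rest).countP (fun p => decide (node ∈ p)) = (p0 :: rest).length := by
          simp [PySem.Dict.empty] at h
          exact_mod_cast h
        have := List.countP_eq_length.mp hlen
        intro p hp; simpa using this p (List.mem_cons_of_mem _ hp)
      · intro h
        have hall : ∀ p ∈ (p0 :: rest), (fun p => decide (node ∈ p)) p = true := by
          intro p hp
          rcases List.mem_cons.mp hp with h0 | h1
          · simp [h0, hnode]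
          · simp [h p h1]
        have := List.countP_eq_length.mpr hall
        simp [PySem.Dict.empty, this]
    cases hc : PySem.Set.contains
        (rest.foldl (fun s path => PySem.Set.inter s (PySem.Set.ofList path)) (PySem.Set.ofList p0)) node with
    | false =>
      cases hval : (((p0 :: rest).foldl
          (fun d path => (PySem.Set.ofList path).foldl (fun d node => d.modify node 0 (· + 1)) d)
          PySem.Dict.empty).getD node 0 == ((p0 :: rest).length : Int)) with
      | false => rfl
      | true => exact absurd (hA.mpr (hB.mp hval)) (by simp only [hc]; decide)
    | true => exact (hB.mpr (hA.mp hc)).symm
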